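-- pv_equiv track=rewrite | github.com/hema-bokam/Information-Retrieval-Projects | Project2-Boolean Query and Inverted Index/src/utils.py | calculate_term_frequencies
-- ===== SOURCE A (Python) =====
-- def calculate_term_frequencies(docId_tokens_map):
--     term_frequencies = {}
--     for doc_id, tokens in docId_tokens_map.items():
--         for term in tokens:
--             if term not in term_frequencies:
--                 term_frequencies[term] = {}
--             if doc_id not in term_frequencies[term]:
--                 term_frequencies[term][doc_id] = 0
--             term_frequencies[term][doc_id] += 1
--     return term_frequencies
-- ===== SOURCE B (Python) =====
-- def calculate_term_frequencies(docId_tokens_map):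
--     # Flatten to a stream of (term, doc_id) events, count distinct pairs in one
--     # flat dict, then group the flat counts into the nested term->doc->count map.
--     events = [(term, doc_id) for doc_id, tokens in docId_tokens_map.items() for term in tokens]
--     pair_counts = {}
--     for ev in events:
--         pair_counts[ev] = pair_counts.get(ev, 0) + 1
--     term_frequencies = {}
--     for (term, doc_id), count in pair_counts.items():
--         term_frequencies.setdefault(term, {})[doc_id] = count
--     return term_frequencies
-- ===== Notes on version B (the rewrite author's own statement) =====
-- stated objective: alternative
-- what changed: A makes one pass over documents and tokens incrementing a nested term->doc->count dict per token; B instead flattens the input into a flat stream of (term, doc_id) events, counts distinct pairs in a single flat dict keyed by the pair, and then reconstructs the nested map in a separate grouping pass over the flat counts.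
import Mathlib
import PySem

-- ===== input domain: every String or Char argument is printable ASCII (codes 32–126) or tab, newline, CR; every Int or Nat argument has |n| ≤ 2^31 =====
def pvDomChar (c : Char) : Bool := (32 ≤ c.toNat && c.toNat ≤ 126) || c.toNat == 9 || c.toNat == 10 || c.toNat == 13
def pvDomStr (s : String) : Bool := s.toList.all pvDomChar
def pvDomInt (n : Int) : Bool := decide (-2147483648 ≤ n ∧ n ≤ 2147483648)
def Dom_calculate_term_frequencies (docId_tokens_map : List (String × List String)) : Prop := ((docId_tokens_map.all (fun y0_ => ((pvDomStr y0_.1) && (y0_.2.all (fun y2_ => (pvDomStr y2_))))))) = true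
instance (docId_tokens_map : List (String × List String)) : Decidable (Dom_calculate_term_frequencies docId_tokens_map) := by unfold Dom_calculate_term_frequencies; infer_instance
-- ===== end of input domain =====

-- B replaces A's nested per-token increments by a flat (term, doc_id) event stream
-- counted in a single flat dict and regrouped afterwards (objective: alternative).

-- ===== PORT A =====
-- loop body of A: per-token increment into the nested dict
def pyIncA (doc_id : String) (tf : PySem.Dict String (PySem.Dict String Int)) (term : String) :
    PySem.Dict String (PySem.Dict String Int) :=
  let tf := if tf.contains term then tf else tf.insert term PySem.Dict.empty
  let tf := if (tf.getD term PySem.Dict.empty).contains doc_id then tf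
            else tf.insert term ((tf.getD term PySem.Dict.empty).insert doc_id 0)
  tf.insert term ((tf.getD term PySem.Dict.empty).insert doc_id
    ((tf.getD term PySem.Dict.empty).getD doc_id 0 + 1))

def calculate_term_frequencies (docId_tokens_map : List (String × List String)) : List (String × List (String × Int)) :=
  ((docId_tokens_map.foldl (fun tf p => p.2.foldl (pyIncA p.1) tf) PySem.Dict.empty).items.map
    (fun q => (q.1, q.2.items)))

-- ===== PORT B =====
-- grouping step of B: term_frequencies.setdefault(term, {})[doc_id] = count
def pyGroupB (tf : PySem.Dict String (PySem.Dict String Int)) (q : (String × String) × Int) :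
    PySem.Dict String (PySem.Dict String Int) :=
  let tf := tf.setdefault q.1.1 PySem.Dict.empty
  tf.insert q.1.1 ((tf.getD q.1.1 PySem.Dict.empty).insert q.1.2 q.2)

def calculate_term_frequencies_alt (docId_tokens_map : List (String × List String)) : List (String × List (String × Int)) :=
  let events := docId_tokens_map.flatMap (fun p => p.2.map (fun t => (t, p.1)))
  let pair_counts := events.foldl (fun c ev => c.insert ev (c.getD ev 0 + 1)) PySem.Dict.empty
  let term_frequencies := pair_counts.items.foldl pyGroupB PySem.Dict.empty
  term_frequencies.items.map (fun q => (q.1, q.2.items))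

-- ===== PRECONDITION & SPEC =====
def Spec_calculate_term_frequencies (docId_tokens_map : List (String × List String)) (out : List (String × List (String × Int))) : Prop := out = calculate_term_frequencies_alt docId_tokens_map
instance (docId_tokens_map : List (String × List String)) (out : List (String × List (String × Int))) : Decidable (Spec_calculate_term_frequencies docId_tokens_map out) := by unfold Spec_calculate_term_frequencies; infer_instance

-- ===== CLAIM (what is proved, stated in full; the proofs are below) =====
def Claim_equal_calculate_term_frequencies : Prop := ∀ (docId_tokens_map : List (String × List String)), Dom_calculate_term_frequencies docId_tokens_map → Spec_calculate_term_frequencies docId_tokens_map (calculate_term_frequencies docId_tokens_map)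

-- ===== LEMMAS AND PROOFS =====

-- A's per-token step is a `modify` that bumps this doc's counter in the term's inner dict.
theorem pyIncA_eq_modify (doc : String) (tf : PySem.Dict String (PySem.Dict String Int)) (term : String) :
    pyIncA doc tf term
      = tf.modify term PySem.Dict.empty (fun inner => inner.insert doc (inner.getD doc 0 + 1)) := by
  unfold pyIncA PySem.Dict.modify
  by_cases h1 : tf.contains term = true
  · by_cases h2 : (tf.getD term PySem.Dict.empty).contains doc = true
    · simp [h1, h2]
    · simp [h1, h2, PySem.Dict.getD_insert_self, PySem.Dict.insert_insert_self,
        PySem.Dict.getD_of_not_contains _ _ (by simpa using h2)]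
  · have h1' : tf.contains term = false := by simpa using h1
    simp [h1', PySem.Dict.getD_insert_self, PySem.Dict.insert_insert_self,
      PySem.Dict.getD_of_not_contains _ _ h1', PySem.Dict.getD_empty, PySem.Dict.contains_empty]

-- B's grouping step is a `modify` that sets this doc's counter in the term's inner dict.
theorem pyGroupB_eq_modify (tf : PySem.Dict String (PySem.Dict String Int)) (q : (String × String) × Int) :
    pyGroupB tf q
      = tf.modify q.1.1 PySem.Dict.empty (fun inner => inner.insert q.1.2 q.2) := by
  unfold pyGroupB PySem.Dict.modify
  by_cases h : tf.contains q.1.1 = true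
  · simp [PySem.Dict.setdefault_of_contains _ _ h]
  · have h' : tf.contains q.1.1 = false := by simpa using h
    simp [PySem.Dict.setdefault_of_not_contains _ _ h', PySem.Dict.getD_insert_self,
      PySem.Dict.insert_insert_self, PySem.Dict.getD_of_not_contains _ _ h']

-- a fold of key-directed modifies, projected at one key, is the fold of the matching entries
theorem foldl_modify_proj {β : Type} (l : List β) (key : β → String)
    (f : β → PySem.Dict String Int → PySem.Dict String Int) :
    ∀ (tf : PySem.Dict String (PySem.Dict String Int)) (t : String),
    (l.foldl (fun tf x => tf.modify (key x) PySem.Dict.empty (f x)) tf).getD t PySem.Dict.empty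
      = (l.filter (fun x => key x == t)).foldl (fun i x => f x i) (tf.getD t PySem.Dict.empty) := by
  induction l with
  | nil => intro tf t; simp
  | cons x xs ih =>
    intro tf t
    rw [List.foldl_cons]
    by_cases h : key x = t
    · rw [List.filter_cons_of_pos (by simpa using h), List.foldl_cons, ih,
        PySem.Dict.getD_modify]
      simp [h]
    · rw [List.filter_cons_of_neg (by simpa using h), ih, PySem.Dict.getD_modify]
      simp [Ne.symm h]

-- dedup commutes with a map of the deduplicated list
theorem ofList_map_ofList {α β : Type} [BEq α] [LawfulBEq α] [BEq β] [LawfulBEq β]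
    (l : List α) (f : α → β) :
    PySem.Set.ofList ((PySem.Set.ofList l).map f) = PySem.Set.ofList (l.map f) := by
  induction l using List.reverseRecOn with
  | nil => rfl
  | append_singleton l x ih =>
    have hL : PySem.Set.ofList (l ++ [x]) = (PySem.Set.ofList l).add x :=
      PySem.Set.ofList_append_singleton l x
    rw [hL, List.map_append, List.map_cons, List.map_nil,
      PySem.Set.ofList_append_singleton, ← ih]
    by_cases hx : x ∈ l
    · rw [PySem.Set.add_of_mem ((PySem.Set.mem_ofList l x).mpr hx),
        PySem.Set.add_of_mem (by
          simp only [PySem.Set.mem_ofList, List.mem_map]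
          exact ⟨x, hx, rfl⟩)]
    · rw [PySem.Set.add_of_not_mem (fun hm => hx ((PySem.Set.mem_ofList l x).mp hm)),
        List.map_append, List.map_cons, List.map_nil, PySem.Set.ofList_append_singleton]

-- dedup commutes with filter
theorem ofList_filter {α : Type} [BEq α] [LawfulBEq α] (l : List α) (p : α → Bool) :
    (PySem.Set.ofList l).filter p = PySem.Set.ofList (l.filter p) := by
  induction l using List.reverseRecOn with
  | nil => rfl
  | append_singleton l x ih =>
    rw [PySem.Set.ofList_append_singleton]
    by_cases hx : x ∈ l
    · rw [PySem.Set.add_of_mem ((PySem.Set.mem_ofList l x).mpr hx), ih, List.filter_append]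
      by_cases hp : p x = true
      · simp only [List.filter_singleton, hp, cond_true]
        rw [PySem.Set.ofList_append_singleton,
          PySem.Set.add_of_mem (show x ∈ PySem.Set.ofList (List.filter p l) from
            (PySem.Set.mem_ofList _ _).mpr (List.mem_filter.mpr ⟨hx, hp⟩))]
      · simp only [List.filter_singleton, hp, cond_false, List.append_nil]
    · rw [PySem.Set.add_of_not_mem (fun hm => hx ((PySem.Set.mem_ofList l x).mp hm)),
        List.filter_append, List.filter_append, ih]
      by_cases hp : p x = true
      · simp only [List.filter_singleton, hp, cond_true]
        rw [PySem.Set.ofList_append_singleton,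
          PySem.Set.add_of_not_mem (show x ∉ PySem.Set.ofList (List.filter p l) from
            fun hm => hx (List.mem_filter.mp ((PySem.Set.mem_ofList _ _).mp hm)).1)]
      · simp only [List.filter_singleton, hp, cond_false, List.append_nil]

-- on a list of pairs with constant first component, dedup commutes with mapping snd
theorem ofList_map_snd {α β : Type} [BEq α] [LawfulBEq α] [BEq β] [LawfulBEq β]
    (t : α) (l : List (α × β)) (h : ∀ ev ∈ l, ev.1 = t) :
    (PySem.Set.ofList l).map Prod.snd = PySem.Set.ofList (l.map Prod.snd) := by
  induction l using List.reverseRecOn with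
  | nil => rfl
  | append_singleton l x ih =>
    have hx1 : x.1 = t := h x (by simp)
    have h' : ∀ ev ∈ l, ev.1 = t := fun ev hev => h ev (by simp [hev])
    rw [PySem.Set.ofList_append_singleton, List.map_append, List.map_cons, List.map_nil,
      PySem.Set.ofList_append_singleton, ← ih h']
    by_cases hx : x ∈ l
    · rw [PySem.Set.add_of_mem ((PySem.Set.mem_ofList l x).mpr hx),
        PySem.Set.add_of_mem (by
          simp only [List.mem_map]
          exact ⟨x, (PySem.Set.mem_ofList l x).mpr hx, rfl⟩)]
    · rw [PySem.Set.add_of_not_mem (fun hm => hx ((PySem.Set.mem_ofList l x).mp hm)),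
        PySem.Set.add_of_not_mem (by
          simp only [List.mem_map, not_exists, not_and]
          intro ev hev heq
          have hev' : ev ∈ l := (PySem.Set.mem_ofList l ev).mp hev
          have : ev = x := Prod.ext ((h' ev hev').trans hx1.symm) heq
          exact hx (this ▸ hev')),
        List.map_append, List.map_cons, List.map_nil]

-- count of a pair among events = count of its doc among the docs of its term
theorem count_pair {α β : Type} [BEq α] [LawfulBEq α] [BEq β] [LawfulBEq β]
    (events : List (α × β)) (t : α) (d : β) :
    events.count (t, d) = (((events.filter (fun ev => ev.1 == t)).map Prod.snd).count d) := by
  induction events with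
  | nil => rfl
  | cons e es ih =>
    by_cases h1 : e.1 = t
    · by_cases h2 : e.2 = d
      · have he : e = (t, d) := Prod.ext h1 h2
        simp [he, ih]
      · have he : e ≠ (t, d) := fun hc => h2 (by rw [hc])
        simp [h1, he, h2, ih]
    · have he : e ≠ (t, d) := fun hc => h1 (by rw [hc])
      simp [h1, he, ih]

-- inserting each dedup'd element with its count rebuilds the counter
theorem foldl_insert_count {α : Type} [BEq α] [LawfulBEq α] (ds : List α) :
    (PySem.Set.ofList ds).foldl (fun i d => i.insert d ((ds.count d : Int))) PySem.Dict.empty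
      = PySem.Dict.counter ds := by
  apply PySem.Dict.ext
  have h := PySem.Dict.items_foldl_insert_fresh (PySem.Set.ofList ds) (fun d => d)
    (fun d => ((ds.count d : Int))) PySem.Dict.empty
    (fun a _ => PySem.Dict.contains_empty a)
    (by simp)
  rw [PySem.Dict.items_counter]
  refine h.trans ?_
  rw [show (PySem.Dict.empty : PySem.Dict α Int).items = [] from rfl, List.nil_append]

-- A's nested document/token loop is the flat fold over the event stream
theorem flatten_foldl (s : PySem.Dict String (PySem.Dict String Int) → (String × String) → PySem.Dict String (PySem.Dict String Int)) :
    ∀ (m : List (String × List String)) (tf : PySem.Dict String (PySem.Dict String Int)),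
    m.foldl (fun tf p => p.2.foldl (fun tf t => s tf (t, p.1)) tf) tf
      = (m.flatMap (fun p => p.2.map (fun t => (t, p.1)))).foldl s tf := by
  intro m
  induction m with
  | nil => intro tf; rfl
  | cons p rest ih =>
    intro tf
    rw [List.foldl_cons, ih, List.flatMap_cons, List.foldl_append, List.foldl_map]

-- the two loop bodies, in `modify` form
def stepF (tf : PySem.Dict String (PySem.Dict String Int)) (ev : String × String) :
    PySem.Dict String (PySem.Dict String Int) :=
  tf.modify ev.1 PySem.Dict.empty (fun inner => inner.insert ev.2 (inner.getD ev.2 0 + 1))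

def stepG (tf : PySem.Dict String (PySem.Dict String Int)) (q : (String × String) × Int) :
    PySem.Dict String (PySem.Dict String Int) :=
  tf.modify q.1.1 PySem.Dict.empty (fun inner => inner.insert q.1.2 q.2)

-- A's fold, projected at a term, is the counter of that term's docs
theorem projF_eq (events : List (String × String)) (t : String) :
    (events.foldl stepF PySem.Dict.empty).getD t PySem.Dict.empty
      = PySem.Dict.counter ((events.filter (fun ev => ev.1 == t)).map Prod.snd) := by
  refine Eq.trans (foldl_modify_proj events Prod.fst
    (fun ev inner => inner.insert ev.2 (inner.getD ev.2 0 + 1)) PySem.Dict.empty t) ?_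
  rw [PySem.Dict.getD_empty]
  refine Eq.trans (Eq.symm (List.foldl_map (f := Prod.snd)
    (g := fun (i : PySem.Dict String Int) d => i.insert d (i.getD d 0 + 1))
    (l := events.filter (fun ev => ev.1 == t)) (init := PySem.Dict.empty))) ?_
  exact PySem.Dict.foldl_insert_getD_add_one_eq_counter _

-- B's grouping fold, projected at a term, is the same counter
theorem projG_eq (events : List (String × String)) (t : String) :
    (((PySem.Dict.counter events).items).foldl stepG PySem.Dict.empty).getD t PySem.Dict.empty
      = PySem.Dict.counter ((events.filter (fun ev => ev.1 == t)).map Prod.snd) := by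
  refine Eq.trans (foldl_modify_proj ((PySem.Dict.counter events).items) (fun q => q.1.1)
    (fun q inner => inner.insert q.1.2 q.2) PySem.Dict.empty t) ?_
  rw [PySem.Dict.getD_empty, PySem.Dict.items_counter, List.filter_map, List.foldl_map]
  have hfil : List.filter ((fun (q : (String × String) × Int) => q.1.1 == t) ∘
        (fun k => (k, ((List.count k events : Int))))) (PySem.Set.ofList events)
      = PySem.Set.ofList (events.filter (fun ev => ev.1 == t)) :=
    ofList_filter events (fun ev => ev.1 == t)
  rw [hfil]
  refine Eq.trans (PySem.List.foldl_congr_mem _ _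
    (fun i (k : String × String) =>
      i.insert k.2 ((List.count k.2 ((events.filter (fun ev => ev.1 == t)).map Prod.snd) : Int)))
    _ ?_) ?_
  · intro acc k hk
    have hk' : k ∈ events.filter (fun ev => ev.1 == t) :=
      (PySem.Set.mem_ofList _ _).mp hk
    have hk1 : k.1 = t := by simpa using (List.mem_filter.mp hk').2
    show acc.insert k.2 ((List.count k events : Int)) = _
    have hkp : k = (t, k.2) := Prod.ext hk1 rfl
    have hc : List.count k events
        = List.count k.2 ((events.filter (fun ev => ev.1 == t)).map Prod.snd) := by
      rw [hkp]; exact count_pair events t k.2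
    rw [hc]
  · refine Eq.trans (Eq.symm (List.foldl_map (f := Prod.snd)
      (g := fun i d => i.insert d ((List.count d ((events.filter (fun ev => ev.1 == t)).map Prod.snd) : Int)))
      (l := PySem.Set.ofList (events.filter (fun ev => ev.1 == t)))
      (init := PySem.Dict.empty))) ?_
    rw [ofList_map_snd t (events.filter (fun ev => ev.1 == t))
      (fun ev hev => by simpa using (List.mem_filter.mp hev).2)]
    exact foldl_insert_count _

-- the heart: the per-token increment fold over the event stream equals
-- grouping the flat pair counter
theorem main_eq (events : List (String × String)) :
    events.foldl stepF PySem.Dict.empty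
      = ((PySem.Dict.counter events).items).foldl stepG PySem.Dict.empty := by
  have hndF : (events.foldl stepF PySem.Dict.empty).keys.Nodup :=
    PySem.Dict.nodup_keys_foldl_modify_key events Prod.fst PySem.Dict.empty
      (fun _ ev inner => inner.insert ev.2 (inner.getD ev.2 0 + 1)) PySem.Dict.empty
      (by simp [PySem.Dict.keys_empty])
  have hndG : (((PySem.Dict.counter events).items).foldl stepG PySem.Dict.empty).keys.Nodup :=
    PySem.Dict.nodup_keys_foldl_modify_key ((PySem.Dict.counter events).items)
      (fun q => q.1.1) PySem.Dict.empty
      (fun _ q inner => inner.insert q.1.2 q.2) PySem.Dict.empty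
      (by simp [PySem.Dict.keys_empty])
  have hkF : (events.foldl stepF PySem.Dict.empty).keys
      = PySem.Set.ofList (events.map Prod.fst) := by
    refine Eq.trans (PySem.Dict.keys_foldl_modify_key events Prod.fst PySem.Dict.empty
      (fun _ ev inner => inner.insert ev.2 (inner.getD ev.2 0 + 1)) PySem.Dict.empty) ?_
    rw [PySem.Dict.keys_empty, PySem.Set.update_nil_left]
  have hkG : (((PySem.Dict.counter events).items).foldl stepG PySem.Dict.empty).keys
      = PySem.Set.ofList (events.map Prod.fst) := by
    refine Eq.trans (PySem.Dict.keys_foldl_modify_key ((PySem.Dict.counter events).items)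
      (fun q => q.1.1) PySem.Dict.empty
      (fun _ q inner => inner.insert q.1.2 q.2) PySem.Dict.empty) ?_
    rw [PySem.Dict.keys_empty, PySem.Set.update_nil_left]
    refine Eq.trans (congrArg PySem.Set.ofList ?_) (ofList_map_ofList events Prod.fst)
    rw [PySem.Dict.items_counter, List.map_map]
    rfl
  have hkeys : (events.foldl stepF PySem.Dict.empty).keys
      = (((PySem.Dict.counter events).items).foldl stepG PySem.Dict.empty).keys :=
    hkF.trans hkG.symm
  apply PySem.Dict.ext
  rw [PySem.Dict.items_eq_map_keys _ hndF PySem.Dict.empty,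
    PySem.Dict.items_eq_map_keys _ hndG PySem.Dict.empty, hkeys]
  refine List.map_congr_left ?_
  intro t _
  rw [projF_eq events t, projG_eq events t]

-- ===== VERDICT (by name: the statement is the Claim_ definition above) =====
theorem calculate_term_frequencies_spec : Claim_equal_calculate_term_frequencies := by
  intro m _
  unfold Spec_calculate_term_frequencies
  unfold calculate_term_frequencies calculate_term_frequencies_alt
  simp only [PySem.Dict.foldl_insert_getD_add_one_eq_counter]
  congr 1
  have hA : (fun (tf : PySem.Dict String (PySem.Dict String Int)) (p : String × List String) =>
      p.2.foldl (pyIncA p.1) tf)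
      = fun tf p => p.2.foldl (fun tf t => stepF tf (t, p.1)) tf := by
    funext tf p
    have : pyIncA p.1 = fun tf t => stepF tf (t, p.1) :=
      funext fun a => funext fun b => pyIncA_eq_modify p.1 a b
    rw [this]
  have hB : pyGroupB = stepG :=
    funext fun tf => funext fun q => pyGroupB_eq_modify tf q
  rw [hA, hB, flatten_foldl stepF m PySem.Dict.empty]
  exact congrArg PySem.Dict.items (main_eq (m.flatMap (fun p => p.2.map (fun t => (t, p.1)))))
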